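-- pv_equiv track=rewrite | github.com/colinschepers/AdventOfCode | challenges/2021/day18.py | find_explode_idx
-- ===== SOURCE A (Python) =====
-- from typing import Optional
--
-- def find_explode_idx(snail: str) -> Optional[int]:
--     depth = 0
--     for idx, char in enumerate(snail):
--         if char == '[':
--             depth += 1
--             if depth == 5:
--                 return idx
--         elif char == ']':
--             depth -= 1
-- ===== SOURCE B (Python) =====
-- from typing import Optional
--
-- def find_explode_idx(snail: str) -> Optional[int]:
--     # Precompute the sorted position lists of '[' and ']', then merge them with a
--     # two-pointer walk: for the k-th open bracket at position p, j counts the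
--     # closing brackets before p, so k - j is the depth above this bracket.
--     opens = [i for i, c in enumerate(snail) if c == '[']
--     closes = [i for i, c in enumerate(snail) if c == ']']
--     j = 0
--     for k, p in enumerate(opens):
--         while j < len(closes) and closes[j] < p:
--             j += 1
--         if k - j == 4:
--             return p
--     return None
-- ===== Notes on version B (the rewrite author's own statement) =====
-- stated objective: alternative
-- what changed: Instead of scanning characters with a running depth counter, B precomputes the two bracket-position lists and merges them with a two-pointer walk, returning the first open bracket whose rank minus the number of closing brackets before it equals 4.
import Mathlib
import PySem

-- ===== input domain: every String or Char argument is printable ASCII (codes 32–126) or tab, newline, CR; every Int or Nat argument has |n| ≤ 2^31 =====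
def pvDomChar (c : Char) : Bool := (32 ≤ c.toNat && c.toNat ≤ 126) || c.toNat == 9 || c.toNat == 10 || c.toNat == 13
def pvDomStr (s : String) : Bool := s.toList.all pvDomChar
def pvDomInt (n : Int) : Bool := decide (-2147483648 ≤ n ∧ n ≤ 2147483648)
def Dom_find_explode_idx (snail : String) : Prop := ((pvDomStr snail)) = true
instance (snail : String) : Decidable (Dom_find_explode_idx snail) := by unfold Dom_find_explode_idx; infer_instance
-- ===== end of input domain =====

-- B replaces A's single character scan with a depth counter by precomputed bracket
-- position lists merged with a two-pointer walk (alternative algorithm, same cost).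

-- ===== PORT A =====
-- A's loop: carry depth and index, return idx when '[' makes depth 5
def findExplodeGoA : List Char → Int → Int → Option Int
  | [], _, _ => none
  | c :: cs, depth, idx =>
    if c = '[' then
      if depth + 1 = 5 then some idx else findExplodeGoA cs (depth + 1) (idx + 1)
    else if c = ']' then findExplodeGoA cs (depth - 1) (idx + 1)
    else findExplodeGoA cs depth (idx + 1)

def find_explode_idx (snail : String) : Option Int :=
  findExplodeGoA snail.toList 0 0

-- ===== PORT B =====
-- position list of a character (the comprehension [i for i, c in enumerate(snail) if c == ch])
def posOf (ch : Char) : List Char → Int → List Int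
  | [], _ => []
  | c :: cs, i => if c = ch then i :: posOf ch cs (i + 1) else posOf ch cs (i + 1)

-- the inner while loop: advance pointer j past the closes that are < p
def advanceJ : List Int → Int → Int → (List Int × Int)
  | [], j, _ => ([], j)
  | q :: qs, j, p => if q < p then advanceJ qs (j + 1) p else (q :: qs, j)

-- the for loop over enumerate(opens): k is the rank of open p, j the two-pointer state
def scanOpens : List Int → Int → List Int → Int → Option Int
  | [], _, _, _ => none
  | p :: ps, k, closes, j =>
    let cj := advanceJ closes j p
    if k - cj.2 = 4 then some p else scanOpens ps (k + 1) cj.1 cj.2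

def find_explode_idx_alt (snail : String) : Option Int :=
  scanOpens (posOf '[' snail.toList 0) 0 (posOf ']' snail.toList 0) 0

-- ===== PRECONDITION & SPEC =====
def Spec_find_explode_idx (snail : String) (out : Option Int) : Prop := out = find_explode_idx_alt snail
instance (snail : String) (out : Option Int) : Decidable (Spec_find_explode_idx snail out) := by unfold Spec_find_explode_idx; infer_instance

-- ===== CLAIM (what is proved, stated in full; the proofs are below) =====
def Claim_equal_find_explode_idx : Prop := ∀ (snail : String), Dom_find_explode_idx snail → Spec_find_explode_idx snail (find_explode_idx snail)

-- ===== LEMMAS AND PROOFS =====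
-- every position produced by posOf starting at i is ≥ i
theorem posOf_ge (ch : Char) : ∀ (cs : List Char) (i q : Int), q ∈ posOf ch cs i → i ≤ q := by
  intro cs
  induction cs with
  | nil => intro i q h; simp [posOf] at h
  | cons c cs ih =>
    intro i q h
    simp only [posOf] at h
    split at h
    · rcases List.mem_cons.mp h with h | h
      · omega
      · have := ih (i + 1) q h; omega
    · have := ih (i + 1) q h; omega

-- advanceJ consumes exactly the past closes (< p) and stops at the rest (≥ p)
theorem advanceJ_eq : ∀ (past : List Int) (rest : List Int) (j p : Int),
    (∀ q ∈ past, q < p) → (∀ q ∈ rest, p ≤ q) →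
    advanceJ (past ++ rest) j p = (rest, j + past.length) := by
  intro past
  induction past with
  | nil =>
    intro rest j p _ hrest
    cases rest with
    | nil => simp [advanceJ]
    | cons q qs =>
      have : ¬ q < p := by have := hrest q (by simp); omega
      simp [advanceJ, this]
  | cons q past ih =>
    intro rest j p hpast hrest
    have hq : q < p := hpast q (by simp)
    simp only [List.cons_append, advanceJ, if_pos hq]
    rw [ih rest (j + 1) p (fun r hr => hpast r (by simp [hr])) hrest]
    have h2 : j + 1 + (past.length : Int) = j + ((q :: past).length : Int) := by
      simp; omega
    rw [h2]

-- main invariant: A's scan at suffix cs, depth d, index idx equals B's two-pointer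
-- scan, where past are the not-yet-consumed closes with positions < idx and
-- d = k - j - past.length
theorem loop_eq : ∀ (cs : List Char) (idx d k j : Int) (past : List Int),
    d = k - j - past.length → (∀ q ∈ past, q < idx) →
    findExplodeGoA cs d idx
      = scanOpens (posOf '[' cs idx) k (past ++ posOf ']' cs idx) j := by
  intro cs
  induction cs with
  | nil =>
    intro idx d k j past _ _
    simp [findExplodeGoA, posOf, scanOpens]
  | cons c cs ih =>
    intro idx d k j past hd hpast
    by_cases hb : c = '['
    · subst hb
      simp only [findExplodeGoA, posOf, Char.reduceEq, reduceIte, scanOpens]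
      rw [advanceJ_eq past (posOf ']' cs (idx + 1)) j idx hpast
        (fun q hq => by have := posOf_ge ']' cs (idx + 1) q hq; omega)]
      by_cases h5 : d + 1 = 5
      · have : k - (j + (past.length : Int)) = 4 := by omega
        simp [h5, this]
      · have : ¬ k - (j + (past.length : Int)) = 4 := by omega
        simp only [if_neg h5, this, if_false]
        rw [ih (idx + 1) (d + 1) (k + 1) (j + past.length) [] (by simp; omega)
          (by simp)]
        simp
    · by_cases hc : c = ']'
      · subst hc
        simp only [findExplodeGoA, posOf, Char.reduceEq, reduceIte]
        rw [ih (idx + 1) (d - 1) k j (past ++ [idx])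
          (by simp; omega)
          (by intro q hq; rcases List.mem_append.mp hq with h | h
              · have := hpast q h; omega
              · simp at h; omega)]
        simp
      · simp only [findExplodeGoA, posOf, if_neg hb, if_neg hc]
        exact ih (idx + 1) d k j past (by omega)
          (fun q hq => by have := hpast q hq; omega)

-- ===== VERDICT (by name: the statement is the Claim_ definition above) =====
theorem find_explode_idx_spec : Claim_equal_find_explode_idx := by
  intro snail _
  unfold Spec_find_explode_idx find_explode_idx find_explode_idx_alt
  have := loop_eq snail.toList 0 0 0 0 [] (by simp) (by simp)
  simpa using this
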